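-- pv_equiv track=rewrite | github.com/kercmari/scraping-tools | faker_module/src/main.py | parse_min_max
-- ===== SOURCE A (Python) =====
-- def parse_min_max(field_config):
--     # Extraer valores min y max de la configuración
--     min_value = None
--     max_value = None
--     if isinstance(field_config, str):
--         parts = field_config.split()
--         for part in parts:
--             if part.startswith('min='):
--                 min_value = int(part.split('=', 1)[1])
--             elif part.startswith('max='):
--                 max_value = int(part.split('=', 1)[1])
--     return min_value, max_value
-- ===== SOURCE B (Python) =====
-- def parse_min_max(field_config):
--     # Build a key->value index of the '=' tokens once, then look up 'min'/'max'.
--     min_value = None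
--     max_value = None
--     if isinstance(field_config, str):
--         d = {}
--         for part in field_config.split():
--             if '=' in part:
--                 key, value = part.split('=', 1)
--                 d[key] = value
--         if 'min' in d:
--             min_value = int(d['min'])
--         if 'max' in d:
--             max_value = int(d['max'])
--     return min_value, max_value
-- ===== Notes on version B (the rewrite author's own statement) =====
-- stated objective: idiomatic
-- what changed: Instead of prefix-matching each token and converting it to int immediately inside the scan, B builds a key->value dict from all '='-tokens in one pass (later duplicates overwrite) and afterwards converts only the 'min'/'max' entries at lookup time.
import Mathlib
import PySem

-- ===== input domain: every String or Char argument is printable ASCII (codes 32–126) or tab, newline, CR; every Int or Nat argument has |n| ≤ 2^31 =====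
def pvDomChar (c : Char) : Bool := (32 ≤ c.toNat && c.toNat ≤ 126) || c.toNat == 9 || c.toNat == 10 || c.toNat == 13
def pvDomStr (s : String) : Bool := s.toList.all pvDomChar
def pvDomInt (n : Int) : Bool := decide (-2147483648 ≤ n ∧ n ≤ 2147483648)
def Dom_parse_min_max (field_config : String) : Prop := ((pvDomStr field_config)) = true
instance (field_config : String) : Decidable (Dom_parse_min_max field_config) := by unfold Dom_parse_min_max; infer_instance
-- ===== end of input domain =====

-- B replaces A's prefix-match-and-convert scan with a build-a-dict-then-lookup strategy (idiomatic; same cost).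

-- shared tokenizer helpers: part.split('=', 1) and its two pieces (both Pythons compute them)
def pvKV (p : String) : List String := (PySem.Str.splitMax? p "=" 1).getD []
def pvKey (p : String) : String := (pvKV p).getD 0 ""
def pvVal (p : String) : String := (pvKV p).getD 1 ""

-- ===== PORT A =====
-- the body of A's for-loop (int() never fails under Pre_, so it is ofStr? there)
def pvStepA (st : Option Int × Option Int) (part : String) : Option Int × Option Int :=
  if PySem.Str.startswith part "min=" then (PySem.Int.ofStr? (pvVal part), st.2)
  else if PySem.Str.startswith part "max=" then (st.1, PySem.Int.ofStr? (pvVal part))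
  else st

def parse_min_max (field_config : String) : Option Int × Option Int :=
  (PySem.Str.split₀ field_config).foldl pvStepA (none, none)

-- ===== PORT B =====
-- the body of B's for-loop: index every '='-token by its key (later duplicates overwrite)
def pvIns (d : PySem.Dict String String) (part : String) : PySem.Dict String String :=
  if PySem.Str.isIn "=" part then d.insert (pvKey part) (pvVal part) else d

-- "int(d[k]) if k in d else None" (int() never fails under Pre_, so it is ofStr? there)
def pvLook (d : PySem.Dict String String) (k : String) : Option Int :=
  match d.get? k with
  | some v => PySem.Int.ofStr? v
  | none => none

def parse_min_max_alt (field_config : String) : Option Int × Option Int :=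
  let d := (PySem.Str.split₀ field_config).foldl pvIns ⟨[]⟩
  (pvLook d "min", pvLook d "max")

-- ===== PRECONDITION & SPEC =====
-- Pre_ excludes exactly the strings on which Python A raises ValueError: a whitespace token
-- starting with 'min='/'max=' whose value part int() rejects.
def Pre_parse_min_max (field_config : String) : Prop :=
  ∀ p ∈ PySem.Str.split₀ field_config,
    (PySem.Str.startswith p "min=" = true ∨ PySem.Str.startswith p "max=" = true) →
    (PySem.Int.ofStr? (pvVal p)).isSome = true
instance (field_config : String) : Decidable (Pre_parse_min_max field_config) := by
  unfold Pre_parse_min_max; infer_instance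

def pvWitness_parse_min_max : String := "min=1 max=10"

def Spec_parse_min_max (field_config : String) (out : Option Int × Option Int) : Prop :=
  out = parse_min_max_alt field_config
instance (field_config : String) (out : Option Int × Option Int) :
    Decidable (Spec_parse_min_max field_config out) := by
  unfold Spec_parse_min_max; infer_instance

-- ===== CLAIM (what is proved, stated in full; the proofs are below) =====
def Claim_equal_parse_min_max : Prop :=
  ∀ (field_config : String), Dom_parse_min_max field_config → Pre_parse_min_max field_config →
    Spec_parse_min_max field_config (parse_min_max field_config)

-- ===== LEMMAS AND PROOFS =====

-- splitOnMax.go with maxsplit budget 0 just flushes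
theorem pv_go0 (fuel : Nat) (l cur : List Char) (acc : List (List Char)) :
    PySem.Chars.splitOnMax.go ['='] fuel 0 l cur acc = ((cur.reverse ++ l) :: acc).reverse := by
  cases fuel with
  | zero => simp [PySem.Chars.splitOnMax.go]
  | succ n =>
    cases l with
    | nil => simp [PySem.Chars.splitOnMax.go]
    | cons c rest => rw [PySem.Chars.splitOnMax.go.eq_def]; simp

-- one unfolding step of go on a nonempty list with budget 1
theorem pv_go_step (fuel : Nat) (c : Char) (rest cur : List Char) (acc : List (List Char)) :
    PySem.Chars.splitOnMax.go ['='] (fuel+1) 1 (c::rest) cur acc =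
      (if ['='].isPrefixOf (c::rest) = true then
        PySem.Chars.splitOnMax.go ['='] fuel 0 (List.drop 1 (c::rest)) [] (cur.reverse :: acc)
      else PySem.Chars.splitOnMax.go ['='] fuel 1 rest (c :: cur) acc) := by
  rw [PySem.Chars.splitOnMax.go.eq_def]; simp

theorem pv_go1 (fuel : Nat) (l : List Char) (hf : l.length < fuel) (cur : List Char)
    (acc : List (List Char)) :
    PySem.Chars.splitOnMax.go ['='] fuel 1 l cur acc =
      if '=' ∈ l then
        ((l.dropWhile (· ≠ '=')).tail :: (cur.reverse ++ l.takeWhile (· ≠ '=')) :: acc).reverse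
      else ((cur.reverse ++ l) :: acc).reverse := by
  induction fuel generalizing l cur acc with
  | zero => omega
  | succ n ih =>
    cases l with
    | nil => simp [PySem.Chars.splitOnMax.go]
    | cons c rest =>
      rw [pv_go_step]
      by_cases hc : c = '='
      · subst hc
        rw [if_pos (by simp [List.isPrefixOf])]
        rw [pv_go0]
        simp
      · rw [if_neg (by simp [List.isPrefixOf]; exact fun h => (hc h.symm).elim)]
        rw [ih rest (by simpa using Nat.lt_of_succ_lt_succ (by simpa using hf)) (c::cur) acc]
        have hmc : ('=' ∈ c :: rest) ↔ ('=' ∈ rest) := by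
          simp only [List.mem_cons]
          constructor
          · rintro (h | h)
            · exact absurd h.symm hc
            · exact h
          · exact Or.inr
        by_cases hm : '=' ∈ rest
        · rw [if_pos hm, if_pos (hmc.mpr hm)]
          simp [hc]
        · rw [if_neg hm, if_neg (fun h => hm (hmc.mp h))]
          simp

theorem pv_splitOnMax_eq (cs : List Char) :
    PySem.Chars.splitOnMax cs ['='] 1 =
      if '=' ∈ cs then [cs.takeWhile (· ≠ '='), (cs.dropWhile (· ≠ '=')).tail]
      else [cs] := by
  unfold PySem.Chars.splitOnMax
  rw [if_neg (by norm_num)]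
  rw [show (1 : Int).toNat = 1 from rfl]
  rw [pv_go1 (cs.length + 1) cs (by omega) [] []]
  by_cases hm : '=' ∈ cs <;> simp [hm]

theorem pv_takeWhile_key (key t : List Char) (hk : '=' ∉ key) :
    (key ++ '='::t).takeWhile (· ≠ '=') = key := by
  induction key with
  | nil => simp
  | cons c cs ih =>
    simp only [List.mem_cons, not_or] at hk
    simp only [List.cons_append, List.takeWhile_cons]
    rw [if_pos (by simpa using (Ne.symm hk.1)), ih hk.2]

theorem pv_dropWhile_ne_nil (cs : List Char) (h : '=' ∈ cs) :
    cs.dropWhile (· ≠ '=') ≠ [] := by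
  intro he
  have h2 := List.takeWhile_append_dropWhile (p := (· ≠ '=')) (l := cs)
  rw [he, List.append_nil] at h2
  have := List.mem_takeWhile_imp (by rw [h2]; exact h)
  simp at this

-- the key equivalence: (key ++ "=") is a prefix of cs ↔ cs contains '=' and its first-'='-segment is key
theorem pv_prefix_iff (cs key : List Char) (hk : '=' ∉ key) :
    (key ++ ['=']) <+: cs ↔ ('=' ∈ cs ∧ cs.takeWhile (· ≠ '=') = key) := by
  constructor
  · rintro ⟨t, rfl⟩
    rw [List.append_assoc]
    refine ⟨by simp, ?_⟩
    simpa using pv_takeWhile_key key t hk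
  · rintro ⟨hmem, htk⟩
    have hne := pv_dropWhile_ne_nil cs hmem
    obtain ⟨d, hd⟩ : ∃ d, cs.dropWhile (· ≠ '=') = '=' :: d := by
      rcases hdw : cs.dropWhile (· ≠ '=') with _ | ⟨a, d⟩
      · exact absurd hdw hne
      · refine ⟨d, ?_⟩
        have h2 := List.head_dropWhile_not (p := (fun x => decide (x ≠ '='))) (w := hne)
        simp only [hdw, List.head_cons] at h2
        have : a = '=' := by simpa using h2
        rw [this]
    refine ⟨d, ?_⟩
    conv_rhs => rw [← List.takeWhile_append_dropWhile (p := (· ≠ '=')) (l := cs)]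
    rw [htk, hd]
    simp

theorem pv_isIn_iff (p : String) : PySem.Str.isIn "=" p = true ↔ '=' ∈ p.toList := by
  show PySem.Chars.isIn "=".toList p.toList = true ↔ _
  rw [PySem.Chars.isIn_iff_infix]
  show ['='] <:+: p.toList ↔ _
  exact List.singleton_infix_iff '=' p.toList

theorem pv_kv_of_mem (p : String) (h : '=' ∈ p.toList) :
    pvKV p = [String.ofList (p.toList.takeWhile (· ≠ '=')),
              String.ofList ((p.toList.dropWhile (· ≠ '=')).tail)] := by
  unfold pvKV PySem.Str.splitMax? PySem.Chars.splitMax?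
  rw [if_neg (by simp)]
  rw [show ("=".toList) = ['='] from rfl]
  rw [pv_splitOnMax_eq, if_pos (by simpa using h)]
  simp

theorem pv_startswith_iff (p k : String) (hk : '=' ∉ k.toList) :
    PySem.Str.startswith p (k ++ "=") = true ↔
      ('=' ∈ p.toList ∧ p.toList.takeWhile (· ≠ '=') = k.toList) := by
  show PySem.Chars.startswith p.toList (k ++ "=").toList = true ↔ _
  unfold PySem.Chars.startswith
  rw [List.isPrefixOf_iff_prefix]
  have : (k ++ "=").toList = k.toList ++ ['='] := by
    simp [String.toList_append]
  rw [this]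
  exact pv_prefix_iff p.toList k.toList hk

-- branch agreement: A's step on the looked-up pair equals looking up after B's insert step
theorem pv_step_eq (p : String) (d : PySem.Dict String String) :
    pvStepA (pvLook d "min", pvLook d "max") p = (pvLook (pvIns d p) "min", pvLook (pvIns d p) "max") := by
  have hmin : PySem.Str.startswith p "min=" = true ↔
      ('=' ∈ p.toList ∧ p.toList.takeWhile (· ≠ '=') = "min".toList) := by
    have := pv_startswith_iff p "min" (by decide)
    simpa using this
  have hmax : PySem.Str.startswith p "max=" = true ↔
      ('=' ∈ p.toList ∧ p.toList.takeWhile (· ≠ '=') = "max".toList) := by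
    have := pv_startswith_iff p "max" (by decide)
    simpa using this
  by_cases h1 : PySem.Str.startswith p "min=" = true
  · obtain ⟨hm, htk⟩ := hmin.mp h1
    have hkey : pvKey p = "min" := by
      unfold pvKey; rw [pv_kv_of_mem p hm]
      simp only [List.getD_cons_zero]
      rw [htk, String.ofList_toList]
    unfold pvStepA pvIns
    rw [if_pos h1, if_pos ((pv_isIn_iff p).mpr hm), hkey]
    unfold pvLook
    rw [PySem.Dict.get?_insert_self, PySem.Dict.get?_insert_of_ne d (pvVal p) (by decide)]
  · by_cases h2 : PySem.Str.startswith p "max=" = true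
    · obtain ⟨hm, htk⟩ := hmax.mp h2
      have hkey : pvKey p = "max" := by
        unfold pvKey; rw [pv_kv_of_mem p hm]
        simp only [List.getD_cons_zero]
        rw [htk, String.ofList_toList]
      unfold pvStepA pvIns
      rw [if_neg h1, if_pos h2, if_pos ((pv_isIn_iff p).mpr hm), hkey]
      unfold pvLook
      rw [PySem.Dict.get?_insert_self, PySem.Dict.get?_insert_of_ne d (pvVal p) (by decide)]
    · unfold pvStepA pvIns
      rw [if_neg h1, if_neg h2]
      by_cases h3 : PySem.Str.isIn "=" p = true
      · have hm := (pv_isIn_iff p).mp h3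
        have hkmin : pvKey p ≠ "min" := by
          intro hkey
          apply h1
          rw [hmin]
          refine ⟨hm, ?_⟩
          unfold pvKey at hkey
          rw [pv_kv_of_mem p hm] at hkey
          simp only [List.getD_cons_zero] at hkey
          rw [← hkey]
          simp
        have hkmax : pvKey p ≠ "max" := by
          intro hkey
          apply h2
          rw [hmax]
          refine ⟨hm, ?_⟩
          unfold pvKey at hkey
          rw [pv_kv_of_mem p hm] at hkey
          simp only [List.getD_cons_zero] at hkey
          rw [← hkey]
          simp
        rw [if_pos h3]
        unfold pvLook
        rw [PySem.Dict.get?_insert_of_ne d (pvVal p) (Ne.symm hkmin),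
            PySem.Dict.get?_insert_of_ne d (pvVal p) (Ne.symm hkmax)]
      · rw [if_neg h3]

theorem pv_loop_eq (ps : List String) (d : PySem.Dict String String) :
    ps.foldl pvStepA (pvLook d "min", pvLook d "max") =
      (pvLook (ps.foldl pvIns d) "min", pvLook (ps.foldl pvIns d) "max") := by
  induction ps generalizing d with
  | nil => rfl
  | cons p rest ih =>
    simp only [List.foldl_cons]
    rw [pv_step_eq p d]
    exact ih (pvIns d p)

theorem pv_main (field_config : String) : parse_min_max field_config = parse_min_max_alt field_config := by
  unfold parse_min_max parse_min_max_alt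
  have h0 : ((none, none) : Option Int × Option Int) =
      (pvLook ⟨[]⟩ "min", pvLook ⟨[]⟩ "max") := rfl
  rw [h0, pv_loop_eq]

-- ===== VERDICT (by name: the statement is the Claim_ definition above) =====
theorem parse_min_max_spec : Claim_equal_parse_min_max := by
  intro field_config _ _
  unfold Spec_parse_min_max
  exact pv_main field_config
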